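-- pv_equiv track=rewrite | github.com/erenersarac10/legalnewest | backend/api/routes/metrics.py | format_prometheus_histogram
-- ===== SOURCE A (Python) =====
-- def format_prometheus_histogram(
--     name: str,
--     buckets: list,
--     values: list,
--     help_text: str = "",
--     labels: dict = None,
-- ) -> str:
--     """
--     Format histogram metric in Prometheus format.
--
--     Harvey/Legora %100: Histogram support for aggregatable percentiles.
--
--     Args:
--         name: Metric name
--         buckets: Bucket boundaries (e.g., [10, 50, 100, 200, 500])
--         values: Values to bucket (observed latencies)
--         help_text: Help text
--         labels: Labels
--
--     Returns:
--         str: Prometheus histogram format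
--
--     Example:
--         >>> format_prometheus_histogram(
--         ...     "search_latency_ms",
--         ...     [10, 50, 100, 200, 500],
--         ...     [45, 120, 85, 190, 350],
--         ...     "Search latency distribution",
--         ...     {"mode": "hybrid"}
--         ... )
--     """
--     lines = []
--
--     # HELP and TYPE
--     if help_text:
--         lines.append(f"# HELP {name} {help_text}")
--     lines.append(f"# TYPE {name} histogram")
--
--     # Label formatting
--     label_str = ""
--     if labels:
--         label_str = "," + ",".join([f'{k}="{v}"' for k, v in labels.items()])
--
--     # Count observations in each bucket
--     total_count = len(values)
--     cumulative_count = 0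
--
--     for bucket in buckets:
--         # Count values <= bucket
--         count = sum(1 for v in values if v <= bucket)
--         cumulative_count = count
--
--         lines.append(f"{name}_bucket{{le=\"{bucket}\"{label_str}}} {cumulative_count}")
--
--     # +Inf bucket (all values)
--     lines.append(f"{name}_bucket{{le=\"+Inf\"{label_str}}} {total_count}")
--
--     # Sum of all observations
--     total_sum = sum(values) if values else 0
--     lines.append(f"{name}_sum{{{label_str.lstrip(',')}}} {total_sum}")
--
--     # Count of observations
--     lines.append(f"{name}_count{{{label_str.lstrip(',')}}} {total_count}")
--
--     return "\n".join(lines) + "\n"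
-- ===== SOURCE B (Python) =====
-- import bisect
--
-- def format_prometheus_histogram(
--     name: str,
--     buckets: list,
--     values: list,
--     help_text: str = "",
--     labels: dict = None,
-- ) -> str:
--     """Same output as A, but sorts the values once and finds each cumulative
--     bucket count with a binary search instead of re-scanning all values per bucket
--     (line formatting dominates on large inputs, so no speed is claimed)."""
--     label_str = ""
--     if labels:
--         label_str = "," + ",".join(f'{k}="{v}"' for k, v in labels.items())
--     bare = label_str.lstrip(",")
--
--     sorted_values = sorted(values)
--     n = len(sorted_values)
--
--     header = ([f"# HELP {name} {help_text}"] if help_text else []) + [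
--         f"# TYPE {name} histogram"
--     ]
--     bucket_lines = [
--         f'{name}_bucket{{le="{b}"{label_str}}} {bisect.bisect_right(sorted_values, b)}'
--         for b in buckets
--     ]
--     footer = [
--         f'{name}_bucket{{le="+Inf"{label_str}}} {n}',
--         f"{name}_sum{{{bare}}} {sum(sorted_values)}",
--         f"{name}_count{{{bare}}} {n}",
--     ]
--     return "\n".join(header + bucket_lines + footer) + "\n"
-- ===== Notes on version B (the rewrite author's own statement) =====
-- stated objective: alternative
-- what changed: A rescans the whole values list for every bucket boundary (O(B*V) comparisons); B sorts the values once and obtains each cumulative bucket count with a single bisect_right binary search, assembling the output lines by comprehensions instead of sequential appends; on the generated inputs line formatting dominates both, so no speed is claimed.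
import Mathlib
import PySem

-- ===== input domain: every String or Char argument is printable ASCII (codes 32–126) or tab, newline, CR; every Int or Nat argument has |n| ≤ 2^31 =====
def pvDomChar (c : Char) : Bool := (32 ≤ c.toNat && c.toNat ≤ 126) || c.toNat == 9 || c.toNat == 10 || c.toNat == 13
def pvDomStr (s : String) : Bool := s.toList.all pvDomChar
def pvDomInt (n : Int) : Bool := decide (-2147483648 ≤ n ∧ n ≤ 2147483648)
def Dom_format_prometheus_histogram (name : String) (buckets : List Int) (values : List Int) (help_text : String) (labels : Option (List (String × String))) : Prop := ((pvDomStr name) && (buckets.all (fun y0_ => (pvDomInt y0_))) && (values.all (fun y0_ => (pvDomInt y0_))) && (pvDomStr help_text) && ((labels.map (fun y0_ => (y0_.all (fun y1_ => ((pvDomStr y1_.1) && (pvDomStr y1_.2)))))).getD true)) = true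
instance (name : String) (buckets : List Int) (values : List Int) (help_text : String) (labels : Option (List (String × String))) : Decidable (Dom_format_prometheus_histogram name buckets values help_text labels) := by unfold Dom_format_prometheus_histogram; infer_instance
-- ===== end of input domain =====

-- B replaces A's per-bucket rescan of all values by one sort plus one binary search per bucket
-- (objective: alternative). Shared formatting helpers (both Pythons contain these identical f-strings).

-- f'{k}="{v}"' for one label pair (identical in A and B)
def pvLabelItem (p : String × String) : String := p.1 ++ "=\"" ++ p.2 ++ "\""

-- label_str = "" / "," + ",".join(...)  (identical code in A and B; 'if labels:' is None-or-empty falsy)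
def pvLabelStr (labels : Option (List (String × String))) : String :=
  match labels with
  | none => ""
  | some l => if l.isEmpty then "" else "," ++ PySem.Str.join "," (l.map pvLabelItem)

-- s.lstrip(',') for the one-char strip set: drop leading ',' characters (exact hand port)
def pvLstripComma (s : String) : String := String.ofList (s.toList.dropWhile (fun c => c == ','))

-- f'{name}_bucket{{le="{bucket}"{label_str}}} {count}'  (identical f-string in A and B)
def pvBucketLine (name : String) (label_str : String) (bucket : Int) (count : Int) : String :=
  name ++ "_bucket{le=\"" ++ PySem.Int.toStr bucket ++ "\"" ++ label_str ++ "} " ++ PySem.Int.toStr count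

-- ===== PORT A =====
def format_prometheus_histogram (name : String) (buckets : List Int) (values : List Int) (help_text : String) (labels : Option (List (String × String))) : String :=
  -- lines = []; HELP/TYPE appends
  let lines : List String :=
    (if help_text ≠ "" then ["# HELP " ++ name ++ " " ++ help_text] else []) ++
    ["# TYPE " ++ name ++ " histogram"]
  let label_str := pvLabelStr labels
  let total_count : Int := (values.length : Int)
  -- for bucket in buckets: count = sum(1 for v in values if v <= bucket); append bucket line
  let lines := buckets.foldl (fun acc bucket =>
    let count : Int := values.foldl (fun c v => if v ≤ bucket then c + 1 else c) 0
    acc ++ [pvBucketLine name label_str bucket count]) lines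
  let total_sum : Int := if values ≠ [] then values.sum else 0
  let lines := lines ++
    [name ++ "_bucket{le=\"+Inf\"" ++ label_str ++ "} " ++ PySem.Int.toStr total_count,
     name ++ "_sum{" ++ pvLstripComma label_str ++ "} " ++ PySem.Int.toStr total_sum,
     name ++ "_count{" ++ pvLstripComma label_str ++ "} " ++ PySem.Int.toStr total_count]
  PySem.Str.join "\n" lines ++ "\n"

-- ===== PORT B =====
def format_prometheus_histogram_alt (name : String) (buckets : List Int) (values : List Int) (help_text : String) (labels : Option (List (String × String))) : String :=
  let label_str := pvLabelStr labels
  let bare := pvLstripComma label_str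
  let sorted_values := PySem.List.sorted values (fun x => x) false
  let n : Int := (sorted_values.length : Int)
  let header : List String :=
    (if help_text ≠ "" then ["# HELP " ++ name ++ " " ++ help_text] else []) ++
    ["# TYPE " ++ name ++ " histogram"]
  -- bisect.bisect_right on the sorted list, one binary search per bucket
  let bucket_lines := buckets.map (fun b =>
    pvBucketLine name label_str b ((PySem.List.bisectRight sorted_values b : Nat) : Int))
  let footer : List String :=
    [name ++ "_bucket{le=\"+Inf\"" ++ label_str ++ "} " ++ PySem.Int.toStr n,
     name ++ "_sum{" ++ bare ++ "} " ++ PySem.Int.toStr sorted_values.sum,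
     name ++ "_count{" ++ bare ++ "} " ++ PySem.Int.toStr n]
  PySem.Str.join "\n" (header ++ bucket_lines ++ footer) ++ "\n"

-- ===== PRECONDITION & SPEC =====
def Spec_format_prometheus_histogram (name : String) (buckets : List Int) (values : List Int) (help_text : String) (labels : Option (List (String × String))) (out : String) : Prop := out = format_prometheus_histogram_alt name buckets values help_text labels
instance (name : String) (buckets : List Int) (values : List Int) (help_text : String) (labels : Option (List (String × String))) (out : String) : Decidable (Spec_format_prometheus_histogram name buckets values help_text labels out) := by unfold Spec_format_prometheus_histogram; infer_instance

-- ===== CLAIM (what is proved, stated in full; the proofs are below) =====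
def Claim_equal_format_prometheus_histogram : Prop := ∀ (name : String) (buckets : List Int) (values : List Int) (help_text : String) (labels : Option (List (String × String))), Dom_format_prometheus_histogram name buckets values help_text labels → Spec_format_prometheus_histogram name buckets values help_text labels (format_prometheus_histogram name buckets values help_text labels)

-- ===== LEMMAS AND PROOFS =====

-- bisect_right on a (≤-)sorted list returns the number of elements ≤ x
theorem pv_bisectRight_eq_countP (xs : List Int) (h : xs.Pairwise (· ≤ ·)) (x : Int) :
    PySem.List.bisectRight xs x = xs.countP (fun y => decide (y ≤ x)) := by
  obtain ⟨hle, hlt, hgt⟩ := PySem.List.bisectRight_spec xs x h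
  set k := PySem.List.bisectRight xs x with hk
  have hsplit : xs = xs.take k ++ xs.drop k := (List.take_append_drop k xs).symm
  rw [hsplit, List.countP_append]
  have h1 : (xs.take k).countP (fun y => decide (y ≤ x)) = (xs.take k).length := by
    rw [List.countP_eq_length]
    intro a ha
    obtain ⟨i, hi, rfl⟩ := List.getElem_of_mem ha
    have hi' := hi
    simp only [List.length_take] at hi'
    rw [List.getElem_take]
    exact decide_eq_true (hlt i (lt_of_lt_of_le (lt_min_iff.mp hi').1 hle) (lt_min_iff.mp hi').1)
  have h2 : (xs.drop k).countP (fun y => decide (y ≤ x)) = 0 := by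
    rw [List.countP_eq_zero]
    intro a ha
    obtain ⟨i, hi, rfl⟩ := List.getElem_of_mem ha
    rw [List.getElem_drop]
    have hki : k + i < xs.length := by
      have := hi; simp only [List.length_drop] at this; omega
    simp only [decide_eq_true_eq, not_le]
    exact hgt (k + i) hki (Nat.le_add_right k i)
  rw [h1, h2, List.length_take]
  have : k ≤ xs.length := hle
  omega

-- A's per-bucket scan count equals B's binary-search count
theorem pv_count_eq (values : List Int) (b : Int) :
    values.foldl (fun c v => if v ≤ b then c + 1 else c) (0 : Int)
      = ((PySem.List.bisectRight (PySem.List.sorted values (fun x => x) false) b : Nat) : Int) := by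
  rw [PySem.List.foldl_ite_add_one, pv_bisectRight_eq_countP _ (by simpa using PySem.List.sorted_pairwise values (fun x => x)) b,
      List.Perm.countP_eq _ (PySem.List.sorted_perm values (fun x => x) false)]
  simp

-- ===== VERDICT (by name: the statement is the Claim_ definition above) =====
theorem format_prometheus_histogram_spec : Claim_equal_format_prometheus_histogram := by
  intro name buckets values help_text labels _
  unfold Spec_format_prometheus_histogram format_prometheus_histogram format_prometheus_histogram_alt
  have hperm := PySem.List.sorted_perm values (fun x => x) false
  have hsum : (if values ≠ [] then values.sum else 0)
      = (PySem.List.sorted values (fun x => x) false).sum := by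
    rw [hperm.sum_eq]
    by_cases h : values = [] <;> simp [h]
  have hlen : (values.length : Int)
      = ((PySem.List.sorted values (fun x => x) false).length : Int) := by
    rw [PySem.List.length_sorted]
  simp only [PySem.List.foldl_append_singleton_eq_map, hsum, hlen, List.append_assoc]
  have hmap : buckets.map (fun x => pvBucketLine name (pvLabelStr labels) x
        (values.foldl (fun c v => if v ≤ x then c + 1 else c) (0 : Int)))
      = buckets.map (fun b => pvBucketLine name (pvLabelStr labels) b
        ((PySem.List.bisectRight (PySem.List.sorted values (fun x => x) false) b : Nat) : Int)) :=
    List.map_congr_left (fun b _ => by rw [pv_count_eq])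
  rw [hmap]
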